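-- pv_equiv track=rewrite | github.com/tverum/aoc2020 | days/day9.py | find_wrong_number
-- ===== SOURCE A (Python) =====
-- from itertools import product
--
-- WINDOW_SIZE = 25
--
-- def find_wrong_number(numbers: list) -> int:
--     """
--     Find the first number in the list that does not hold to the property
--     :param numbers: the list of numbers
--     :return: the first number that does not hold to the property
--     """
--     window = numbers[:WINDOW_SIZE]
--     index = WINDOW_SIZE
--     while index < len(numbers):
--         combinations = list(product(window, repeat=2))
--         combinations = list(map(lambda x: x[0] + x[1], combinations))
--         if not numbers[index] in combinations:
--             return numbers[index]
--         else:
--             window = window[1:]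
--             window.append(numbers[index])
--             index += 1
--
--     return -1
-- ===== SOURCE B (Python) =====
-- WINDOW_SIZE = 25
--
-- def find_wrong_number(numbers: list) -> int:
--     """Sliding-window check via a hash set: target t is a sum of two window
--     elements iff some x in the window has t - x in the window's set
--     (x may pair with itself, matching product(repeat=2))."""
--     for i in range(WINDOW_SIZE, len(numbers)):
--         window = numbers[i - WINDOW_SIZE:i]
--         wset = set(window)
--         target = numbers[i]
--         if not any(target - x in wset for x in window):
--             return target
--     return -1
-- ===== Notes on version B (the rewrite author's own statement) =====
-- stated objective: alternative
-- what changed: Replaces the cartesian product of the window (625 materialised pair-sums per step) by a set-membership test (t - x in set(window) for some window element x), and recomputes the window as a slice per index instead of carrying and mutating it.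
import Mathlib
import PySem

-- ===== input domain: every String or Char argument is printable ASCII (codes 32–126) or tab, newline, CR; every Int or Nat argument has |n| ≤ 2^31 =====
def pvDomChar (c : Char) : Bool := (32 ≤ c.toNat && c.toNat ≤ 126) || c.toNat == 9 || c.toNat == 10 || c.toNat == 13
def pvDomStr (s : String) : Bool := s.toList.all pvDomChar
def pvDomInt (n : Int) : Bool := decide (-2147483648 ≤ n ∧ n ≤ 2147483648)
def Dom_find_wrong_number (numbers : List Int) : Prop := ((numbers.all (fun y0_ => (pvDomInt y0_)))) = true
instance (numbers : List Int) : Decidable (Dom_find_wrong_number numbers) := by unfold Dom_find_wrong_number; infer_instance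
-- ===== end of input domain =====

-- B replaces A's 625 materialised pair-sums per step by a set lookup: t - x ∈ set(window).

-- ===== PORT A =====
-- while loop of A: carries the mutated `window` and `index`
def find_wrong_number_loop (numbers : List Int) (window : List Int) (index : Nat) : Int :=
  if h : index < numbers.length then
    -- combinations = product(window, repeat=2) mapped to sums
    let sums := window.flatMap (fun x => window.map (fun y => x + y))
    if numbers[index] ∈ sums then
      -- window = window[1:]; window.append(numbers[index]); index += 1
      find_wrong_number_loop numbers (window.drop 1 ++ [numbers[index]]) (index + 1)
    else
      numbers[index]
  else -1
termination_by numbers.length - index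

def find_wrong_number (numbers : List Int) : Int :=
  -- window = numbers[:25]; index = 25
  find_wrong_number_loop numbers (numbers.take 25) 25

-- ===== PORT B =====
-- for-loop of B over i in range(25, len(numbers)), window recomputed as a slice
def find_wrong_number_alt_loop (numbers : List Int) (i : Nat) : Int :=
  if h : i < numbers.length then
    let window := (numbers.drop (i - 25)).take 25   -- numbers[i-25:i], exact for i ≥ 25 (PySem.List.slice_natCast)
    let wset := PySem.Set.ofList window
    let target := numbers[i]
    if window.any (fun x => PySem.Set.contains wset (target - x)) then
      find_wrong_number_alt_loop numbers (i + 1)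
    else
      target
  else -1
termination_by numbers.length - i

def find_wrong_number_alt (numbers : List Int) : Int :=
  find_wrong_number_alt_loop numbers 25

-- ===== PRECONDITION & SPEC =====
def Spec_find_wrong_number (numbers : List Int) (out : Int) : Prop := out = find_wrong_number_alt numbers
instance (numbers : List Int) (out : Int) : Decidable (Spec_find_wrong_number numbers out) := by unfold Spec_find_wrong_number; infer_instance

-- ===== CLAIM (what is proved, stated in full; the proofs are below) =====
def Claim_equal_find_wrong_number : Prop := ∀ (numbers : List Int), Dom_find_wrong_number numbers → Spec_find_wrong_number numbers (find_wrong_number numbers)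

-- ===== LEMMAS AND PROOFS =====

-- t is one of A's pair-sums iff B's set test fires
theorem pv_mem_sums_iff (window : List Int) (t : Int) :
    t ∈ window.flatMap (fun x => window.map (fun y => x + y)) ↔
    (window.any (fun x => PySem.Set.contains (PySem.Set.ofList window) (t - x)) = true) := by
  simp [List.mem_flatMap, List.mem_map, List.any_eq_true,
        PySem.Set.mem_ofList]
  constructor
  · rintro ⟨x, hx, y, hy, rfl⟩
    exact ⟨x, hx, by simpa using hy⟩
  · rintro ⟨x, hx, hy⟩
    exact ⟨x, hx, t - x, hy, by ring⟩

-- sliding the 25-window: dropping the head and appending numbers[i] is the next slice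
theorem pv_window_slide (numbers : List Int) (i : Nat) (h25 : 25 ≤ i)
    (h : i < numbers.length) :
    ((numbers.drop (i - 25)).take 25).drop 1 ++ [numbers[i]] =
      (numbers.drop (i + 1 - 25)).take 25 := by
  have h1 : ((numbers.drop (i - 25)).take 25).drop 1 = (numbers.drop (i - 24)).take 24 := by
    rw [List.drop_take, List.drop_drop]
    congr 2
    omega
  have h2 : (numbers.drop (i - 24))[24]? = some numbers[i] := by
    rw [List.getElem?_drop, show i - 24 + 24 = i from by omega, List.getElem?_eq_getElem h]
  have h3 : (numbers.drop (i - 24)).take 25 =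
      (numbers.drop (i - 24)).take 24 ++ [numbers[i]] := by
    rw [show (25 : Nat) = 24 + 1 from rfl, List.take_add_one, h2]
    rfl
  rw [h1, show i + 1 - 25 = i - 24 from by omega]
  exact h3.symm

-- the two loops agree from any index ≥ 25 (A's window is then the current slice)
theorem pv_loops_eq (numbers : List Int) (i : Nat) (h25 : 25 ≤ i) :
    find_wrong_number_loop numbers ((numbers.drop (i - 25)).take 25) i =
      find_wrong_number_alt_loop numbers i := by
  rw [find_wrong_number_loop, find_wrong_number_alt_loop]
  by_cases h : i < numbers.length
  · simp only [h, dite_true]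
    by_cases hmem : numbers[i] ∈
        ((numbers.drop (i - 25)).take 25).flatMap
          (fun x => ((numbers.drop (i - 25)).take 25).map (fun y => x + y))
    · rw [if_pos hmem, if_pos ((pv_mem_sums_iff _ _).mp hmem),
          pv_window_slide numbers i h25 h]
      exact pv_loops_eq numbers (i + 1) (by omega)
    · rw [if_neg hmem, if_neg (fun hc => hmem ((pv_mem_sums_iff _ _).mpr hc))]
  · simp [h]
termination_by numbers.length - i

-- ===== VERDICT (by name: the statement is the Claim_ definition above) =====
theorem find_wrong_number_spec : Claim_equal_find_wrong_number := by
  intro numbers _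
  unfold Spec_find_wrong_number find_wrong_number find_wrong_number_alt
  have := pv_loops_eq numbers 25 (le_refl 25)
  simpa using this
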